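-- pv_equiv track=rewrite | github.com/ckswls56/BaejoonHub | 프로그래머스/unrated/181881. 조건에 맞게 수열 변환하기 2/조건에 맞게 수열 변환하기 2.py | solution
-- ===== SOURCE A (Python) =====
-- def solution(arr):
--     before = arr[:]
--     answer = 0
--     idx = 0
--     while True :
--         for i in range(len(arr)) :
--             if arr[i] >= 50 and arr[i] % 2 == 0 :
--                 arr[i] //= 2
--             elif arr[i] <= 50 and arr[i] % 2 :
--                 arr[i] = arr[i] *2 + 1
--
--         if before == arr :
--             return answer
--         before = arr[:]
--         answer += 1
-- ===== SOURCE B (Python) =====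
-- def solution(arr):
--     best = 0
--     for i in range(len(arr)):
--         v = arr[i]
--         c = 0
--         # halving phase: the halving rule is the only one that can fire while v is even
--         while v % 2 == 0 and v >= 50:
--             v //= 2
--             c += 1
--         # doubling phase, closed form: an odd v between 1 and 49 is sent to 2^k*(v+1)-1
--         # where k is the least exponent making that value exceed 50
--         if v % 2 != 0 and 0 <= v <= 50:
--             k = (51 // (v + 1)).bit_length()
--             c += k
--             v = (v + 1) * (1 << k) - 1
--         arr[i] = v
--         best = max(best, c)
--     return best
-- ===== Notes on version B (the rewrite author's own statement) =====
-- stated objective: alternative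
-- what changed: Instead of repeatedly rescanning the whole array pass by pass until a full pass changes nothing, B handles each element once: a short halving loop while it is even and >= 50, then a bit_length closed form that jumps an odd value between 1 and 49 straight to its doubling fixed point with the exact change count; the answer is the maximum per-element count (same in-place mutation of arr).
import Mathlib
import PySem

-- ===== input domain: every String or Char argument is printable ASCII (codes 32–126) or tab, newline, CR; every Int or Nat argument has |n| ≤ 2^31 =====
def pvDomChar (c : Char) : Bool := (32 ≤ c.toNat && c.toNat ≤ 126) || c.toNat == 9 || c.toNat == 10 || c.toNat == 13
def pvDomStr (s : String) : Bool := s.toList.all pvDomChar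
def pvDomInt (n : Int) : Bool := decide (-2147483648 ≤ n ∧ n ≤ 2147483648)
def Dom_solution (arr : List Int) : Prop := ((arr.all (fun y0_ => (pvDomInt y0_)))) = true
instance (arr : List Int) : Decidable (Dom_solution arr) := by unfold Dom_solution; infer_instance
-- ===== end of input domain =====

-- B replaces A's repeated full-array passes by one pass that, per element, runs a halving loop
-- and then jumps to the doubling fixed point by a bit-length closed form; both Pythons mutate
-- arr in place to the same final state, and the theorems here are about the RETURN value.

-- ===== PORT A =====
-- one element-transformation of A's inner for-loop body (each index is updated once, independently)
def stepA (x : Int) : Int :=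
  if 50 ≤ x ∧ PySem.Int.mod x 2 = 0 then PySem.Int.floordiv x 2
  else if x ≤ 50 ∧ PySem.Int.mod x 2 ≠ 0 then x * 2 + 1
  else x

-- the 'for i in range(len(arr))' pass
def passA (arr : List Int) : List Int := arr.map stepA

-- the 'while True' loop; fuel only makes the loop total (it is proved sufficient under Pre_)
def loopA : Nat → List Int → Int → Int
  | 0, _, answer => answer
  | fuel + 1, arr, answer =>
    let arr' := passA arr
    if arr = arr' then answer else loopA fuel arr' (answer + 1)

def solution (arr : List Int) : Int :=
  loopA (arr.foldl (fun a x => a + x.natAbs + 61) 1) arr 0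

-- ===== PORT B =====
-- Python's m.bit_length() for m ≥ 0; the first argument is a totality fuel (any f ≥ t works)
def bitLenAux : Nat → Nat → Nat
  | 0, _ => 0
  | f + 1, t => if t = 0 then 0 else bitLenAux f (t / 2) + 1

def pyBitLength (t : Nat) : Nat := bitLenAux t t

-- Source B's halving phase: (converged-so-far value, number of halvings); fuel guards totality.
-- Lean's % and / agree with Python's % and // here: the divisor 2 is positive.
def halveAux : Nat → Int → Int × Nat
  | 0, v => (v, 0)
  | f + 1, v =>
    if v % 2 = 0 ∧ 50 ≤ v then
      let p := halveAux f (v / 2)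
      (p.1, p.2 + 1)
    else (v, 0)

def halveB (v : Int) : Int × Nat := halveAux v.toNat v

-- per-element change count: halvings plus the closed-form doubling count
def elemSteps (v : Int) : Int :=
  let p := halveB v
  if p.1 % 2 ≠ 0 ∧ 0 ≤ p.1 ∧ p.1 ≤ 50 then
    (p.2 : Int) + (pyBitLength (51 / (p.1 + 1)).toNat : Int)
  else (p.2 : Int)

def solution_alt (arr : List Int) : Int :=
  arr.foldl (fun best v => max best (elemSteps v)) 0

-- ===== PRECONDITION & SPEC =====
-- Pre_ excludes exactly the inputs on which A never returns: an element that is odd and < -1 is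
-- sent to 2*x+1 < x forever, so A's while-loop diverges.
def Pre_solution (arr : List Int) : Prop := ∀ x ∈ arr, x % 2 = 0 ∨ -1 ≤ x
instance (arr : List Int) : Decidable (Pre_solution arr) := by unfold Pre_solution; infer_instance
def pvWitness_solution : List Int := [100, 3, -1, 0]

def Spec_solution (arr : List Int) (out : Int) : Prop := out = solution_alt arr
instance (arr : List Int) (out : Int) : Decidable (Spec_solution arr out) := by unfold Spec_solution; infer_instance

-- ===== CLAIM (what is proved, stated in full; the proofs are below) =====
def Claim_equal_solution : Prop := ∀ (arr : List Int), Dom_solution arr → Pre_solution arr → Spec_solution arr (solution arr)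

-- ===== LEMMAS AND PROOFS =====

-- arithmetic form of one step
theorem stepA_def (x : Int) :
    stepA x = if 50 ≤ x ∧ x % 2 = 0 then x / 2 else if x ≤ 50 ∧ x % 2 ≠ 0 then x * 2 + 1 else x := by
  unfold stepA
  rw [PySem.Int.mod_eq_emod_of_pos (by norm_num), PySem.Int.floordiv_eq_ediv_of_pos (by norm_num)]

-- per-element precondition (termination region)
def Pel (x : Int) : Prop := x % 2 = 0 ∨ -1 ≤ x

-- termination measure for one element
def muV (x : Int) : Nat := if x % 2 = 0 then x.natAbs + 10 else (51 - x).toNat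

theorem step_decrease (x : Int) (hp : Pel x) (hne : stepA x ≠ x) :
    Pel (stepA x) ∧ muV (stepA x) < muV x := by
  unfold Pel at *
  rw [stepA_def] at hne ⊢
  unfold muV
  split_ifs at hne ⊢ <;> omega

theorem pel_step (x : Int) (hp : Pel x) : Pel (stepA x) := by
  by_cases h : stepA x = x
  · rwa [h]
  · exact (step_decrease x hp h).1

theorem ex_fix_aux : ∀ (k : Nat) (x : Int), muV x ≤ k → Pel x →
    ∃ n, stepA (stepA^[n] x) = stepA^[n] x ∧ n ≤ muV x := by
  intro k
  induction k with
  | zero =>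
    intro x hk hp
    refine ⟨0, ?_, Nat.zero_le _⟩
    simp only [Function.iterate_zero_apply]
    have hx : ¬(x % 2 = 0) ∧ 51 ≤ x := by
      unfold muV at hk; split_ifs at hk <;> omega
    have h1 : ¬(50 ≤ x ∧ x % 2 = 0) := fun h => hx.1 h.2
    have h2 : ¬(x ≤ 50 ∧ x % 2 ≠ 0) := fun h => by omega
    rw [stepA_def, if_neg h1, if_neg h2]
  | succ k ih =>
    intro x hk hp
    by_cases hfix : stepA x = x
    · exact ⟨0, by simpa using hfix, Nat.zero_le _⟩
    · obtain ⟨hp', hlt⟩ := step_decrease x hp hfix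
      obtain ⟨n, hn, hle⟩ := ih (stepA x) (by omega) hp'
      refine ⟨n + 1, ?_, by omega⟩
      rw [Function.iterate_succ_apply]
      exact hn

theorem ex_fix (x : Int) (hp : Pel x) : ∃ n, stepA (stepA^[n] x) = stepA^[n] x :=
  ((ex_fix_aux (muV x) x le_rfl hp).imp fun _ h => h.1)

-- number of transformations until the element is fixed (proof-side only)
noncomputable def stepsV (x : Int) : Nat :=
  @dite _ (∃ n, stepA (stepA^[n] x) = stepA^[n] x) (Classical.dec _) (fun h => Nat.find h) (fun _ => 0)

theorem stepsV_le_mu (x : Int) (hp : Pel x) : stepsV x ≤ muV x := by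
  obtain ⟨n, hn, hle⟩ := ex_fix_aux (muV x) x le_rfl hp
  unfold stepsV
  rw [dif_pos (ex_fix x hp)]
  exact le_trans (Nat.find_le hn) hle

theorem stepsV_of_fix (x : Int) (h : stepA x = x) : stepsV x = 0 := by
  unfold stepsV
  rw [dif_pos (⟨0, by simpa using h⟩ : ∃ n, stepA (stepA^[n] x) = stepA^[n] x)]
  exact (Nat.find_eq_zero _).mpr (by simpa using h)

theorem ex_fix_step (x : Int) (ex : ∃ n, stepA (stepA^[n] x) = stepA^[n] x) :
    ∃ n, stepA (stepA^[n] (stepA x)) = stepA^[n] (stepA x) := by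
  obtain ⟨n, hn⟩ := ex
  cases n with
  | zero =>
    refine ⟨0, ?_⟩
    simp only [Function.iterate_zero_apply] at hn ⊢
    simp [hn]
  | succ m => exact ⟨m, by rwa [← Function.iterate_succ_apply]⟩

theorem stepsV_succ (x : Int) (ex : ∃ n, stepA (stepA^[n] x) = stepA^[n] x)
    (hne : stepA x ≠ x) : stepsV x = stepsV (stepA x) + 1 := by
  have ex' := ex_fix_step x ex
  unfold stepsV
  rw [dif_pos ex, dif_pos ex']
  have h1 : Nat.find ex ≤ Nat.find ex' + 1 :=
    Nat.find_le (by rw [Function.iterate_succ_apply]; exact Nat.find_spec ex')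
  have h0 : Nat.find ex ≠ 0 := fun h => hne (by simpa using (Nat.find_eq_zero ex).mp h)
  have h2 : Nat.find ex' ≤ Nat.find ex - 1 := by
    refine Nat.find_le ?_
    have hs := Nat.find_spec ex
    have hrw : Nat.find ex = (Nat.find ex - 1) + 1 := by omega
    rw [hrw, Function.iterate_succ_apply] at hs
    exact hs
  omega

theorem stepsV_step (x : Int) (hp : Pel x) : stepsV (stepA x) = stepsV x - 1 := by
  by_cases h : stepA x = x
  · rw [h, stepsV_of_fix x h]
  · rw [stepsV_succ x (ex_fix x hp) h]
    omega

-- === the B-side closed form computes stepsV ===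

theorem bitLenAux_zero : ∀ (f : Nat), bitLenAux f 0 = 0 := by
  intro f
  cases f with
  | zero => rfl
  | succ f => simp [bitLenAux]

theorem bitLenAux_congr : ∀ (f g t : Nat), t ≤ f → t ≤ g → bitLenAux f t = bitLenAux g t := by
  intro f
  induction f with
  | zero =>
    intro g t hf _
    have : t = 0 := by omega
    subst this
    rw [bitLenAux_zero, bitLenAux_zero]
  | succ f ih =>
    intro g t hf hg
    by_cases ht : t = 0
    · subst ht
      rw [bitLenAux_zero, bitLenAux_zero]
    · obtain ⟨g', rfl⟩ : ∃ g', g = g' + 1 := ⟨g - 1, by omega⟩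
      simp only [bitLenAux, if_neg ht]
      exact congrArg (· + 1) (ih g' (t / 2) (by omega) (by omega))

theorem pyBitLength_pos (t : Nat) (ht : 1 ≤ t) : pyBitLength t = pyBitLength (t / 2) + 1 := by
  obtain ⟨s, rfl⟩ : ∃ s, t = s + 1 := ⟨t - 1, by omega⟩
  unfold pyBitLength
  simp only [bitLenAux, if_neg (by omega : ¬(s + 1 = 0))]
  rw [bitLenAux_congr s ((s + 1) / 2) ((s + 1) / 2) (by omega) le_rfl]

-- the doubling phase: for odd y ≥ 1, bit_length(51 // (y+1)) is the change count
theorem stepsV_odd : ∀ (m : Nat) (y : Int), y % 2 = 1 → 1 ≤ y → (51 - y).toNat ≤ m →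
    stepsV y = pyBitLength ((51 / (y + 1)).toNat) := by
  intro m
  induction m with
  | zero =>
    intro y h2 h1 hm
    have h51 : 51 ≤ y := by omega
    have hfix : stepA y = y := by
      rw [stepA_def, if_neg (by omega), if_neg (by omega)]
    rw [stepsV_of_fix y hfix]
    have : (51 : Int) / (y + 1) = 0 := Int.ediv_eq_zero_of_lt (by omega) (by omega)
    rw [this]
    simp [pyBitLength, bitLenAux]
  | succ m ih =>
    intro y h2 h1 hm
    by_cases h51 : 51 ≤ y
    · have hfix : stepA y = y := by
        rw [stepA_def, if_neg (by omega), if_neg (by omega)]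
      rw [stepsV_of_fix y hfix]
      have : (51 : Int) / (y + 1) = 0 := Int.ediv_eq_zero_of_lt (by omega) (by omega)
      rw [this]
      simp [pyBitLength, bitLenAux]
    · -- 1 ≤ y ≤ 49 odd: one doubling, then induction
      have hy49 : y ≤ 49 := by omega
      have hstep : stepA y = y * 2 + 1 := by
        rw [stepA_def, if_neg (by omega), if_pos (by omega)]
      have hne : stepA y ≠ y := by rw [hstep]; omega
      have hrec := stepsV_succ y (ex_fix y (Or.inr (by omega))) hne
      rw [hrec, hstep]
      rw [ih (y * 2 + 1) (by omega) (by omega) (by omega)]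
      -- now the Nat side: bit_length recursion
      obtain ⟨n, rfl⟩ : ∃ n : Nat, y = (n : Int) := ⟨y.toNat, by omega⟩
      have e1 : ((51 : Int) / ((n : Int) + 1)).toNat = 51 / (n + 1) := by
        norm_cast
      have e2 : ((51 : Int) / ((n : Int) * 2 + 1 + 1)).toNat = 51 / (n + 1) / 2 := by
        rw [Nat.div_div_eq_div_mul, show (n + 1) * 2 = n * 2 + 1 + 1 from by ring]
        norm_cast
      rw [e1, e2]
      have hn1 : 1 ≤ 51 / (n + 1) := by
        apply Nat.one_le_div_iff (by omega) |>.mpr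
        omega
      rw [pyBitLength_pos _ hn1]

-- the halving phase: halveB accounts for exactly the leading halvings of stepsV
theorem halveAux_spec : ∀ (f : Nat) (v : Int), Pel v → (v < 50 ∨ v.toNat ≤ f) →
    ¬((halveAux f v).1 % 2 = 0 ∧ 50 ≤ (halveAux f v).1) ∧ Pel (halveAux f v).1 ∧
      stepsV v = (halveAux f v).2 + stepsV (halveAux f v).1 := by
  intro f
  induction f with
  | zero =>
    intro v hp hf
    simp only [halveAux]
    exact ⟨fun h => by omega, hp, by simp⟩
  | succ f ih =>
    intro v hp hf
    by_cases h : v % 2 = 0 ∧ 50 ≤ v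
    · have hstep : stepA v = v / 2 := by
        rw [stepA_def, if_pos (by omega)]
      have hne : stepA v ≠ v := by rw [hstep]; omega
      have hrec := stepsV_succ v (ex_fix v hp) hne
      obtain ⟨hA, hB, hC⟩ := ih (v / 2) (by unfold Pel; omega) (by omega)
      simp only [halveAux, if_pos h]
      refine ⟨hA, hB, ?_⟩
      rw [hrec, hstep, hC]
      omega
    · simp only [halveAux, if_neg h]
      exact ⟨h, hp, by simp⟩

theorem halveB_spec (v : Int) (hp : Pel v) :
    ¬((halveB v).1 % 2 = 0 ∧ 50 ≤ (halveB v).1) ∧ Pel (halveB v).1 ∧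
      stepsV v = (halveB v).2 + stepsV (halveB v).1 :=
  halveAux_spec v.toNat v hp (Or.inr le_rfl)

theorem elemSteps_eq (v : Int) (hp : Pel v) : elemSteps v = (stepsV v : Int) := by
  obtain ⟨hA, hB, hC⟩ := halveB_spec v hp
  unfold elemSteps
  set w := (halveB v).1 with hw
  by_cases hg : w % 2 ≠ 0 ∧ 0 ≤ w ∧ w ≤ 50
  · rw [if_pos hg]
    have h2 : w % 2 = 1 := by omega
    have h1 : 1 ≤ w := by omega
    rw [hC, stepsV_odd ((51 - w).toNat) w h2 h1 le_rfl]
    push_cast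
    ring
  · rw [if_neg hg]
    have hfix : stepA w = w := by
      rw [stepA_def]
      unfold Pel at hB
      rcases Int.emod_two_eq w with he | ho
      · rw [if_neg (fun hh => by omega), if_neg (fun hh => by omega)]
      · -- w odd: by hA, ¬(50 ≤ w) is not forced... odd fails first branch anyway
        by_cases h50 : w ≤ 50
        · -- odd, ≤ 50, not in guard hg ⇒ w < 0 ⇒ w = -1 by Pel
          have : w = -1 := by omega
          rw [if_neg (by omega), if_pos (by omega)]
          omega
        · rw [if_neg (by omega), if_neg (by omega)]
    rw [hC, stepsV_of_fix w hfix]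
    simp

-- maximum per-element step count
noncomputable def MaxV (arr : List Int) : Nat := arr.foldl (fun m x => max m (stepsV x)) 0

theorem mu_le (x : Int) : muV x ≤ x.natAbs + 61 := by
  unfold muV
  split_ifs <;> omega

theorem alt_fold : ∀ (arr : List Int) (b : Nat), (∀ x ∈ arr, Pel x) →
    arr.foldl (fun best v => max best (elemSteps v)) ((b : Nat) : Int)
      = ((arr.foldl (fun m x => max m (stepsV x)) b : Nat) : Int) := by
  intro arr
  induction arr with
  | nil => intro b _; simp
  | cons x xs ih =>
    intro b hp
    have hx : Pel x := hp x (List.mem_cons_self ..)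
    simp only [List.foldl_cons]
    rw [elemSteps_eq x hx, ← Nat.cast_max]
    exact ih (max b (stepsV x)) (fun y hy => hp y (List.mem_cons_of_mem _ hy))

theorem map_fix_iff (arr : List Int) : arr.map stepA = arr ↔ ∀ x ∈ arr, stepA x = x := by
  induction arr with
  | nil => simp
  | cons x xs ih => simp [ih]

theorem fold_max_map : ∀ (arr : List Int) (a b : Nat), (∀ x ∈ arr, Pel x) → a = b - 1 →
    (arr.map stepA).foldl (fun m x => max m (stepsV x)) a
      = arr.foldl (fun m x => max m (stepsV x)) b - 1 := by
  intro arr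
  induction arr with
  | nil => intro a b _ h; simpa using h
  | cons x xs ih =>
    intro a b hp hab
    simp only [List.map_cons, List.foldl_cons]
    refine ih (max a (stepsV (stepA x))) (max b (stepsV x)) (fun y hy => hp y (List.mem_cons_of_mem _ hy)) ?_
    have hs := stepsV_step x (hp x (List.mem_cons_self ..))
    omega

theorem MaxV_map (arr : List Int) (hp : ∀ x ∈ arr, Pel x) :
    MaxV (arr.map stepA) = MaxV arr - 1 :=
  fold_max_map arr 0 0 hp rfl

theorem MaxV_zero : ∀ (arr : List Int) (b : Nat), (∀ x ∈ arr, stepA x = x) →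
    arr.foldl (fun m x => max m (stepsV x)) b = b := by
  intro arr
  induction arr with
  | nil => intro b _; rfl
  | cons x xs ih =>
    intro b h
    simp only [List.foldl_cons, stepsV_of_fix x (h x (List.mem_cons_self ..))]
    simpa using ih b (fun y hy => h y (List.mem_cons_of_mem _ hy))

theorem le_fold_maxS : ∀ (arr : List Int) (b : Nat), b ≤ arr.foldl (fun m x => max m (stepsV x)) b := by
  intro arr
  induction arr with
  | nil => intro b; exact le_rfl
  | cons x xs ih =>
    intro b
    simp only [List.foldl_cons]
    exact le_trans (le_max_left _ _) (ih (max b (stepsV x)))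

theorem mem_le_fold : ∀ (arr : List Int) (b : Nat) (x : Int), x ∈ arr →
    stepsV x ≤ arr.foldl (fun m x => max m (stepsV x)) b := by
  intro arr
  induction arr with
  | nil => intro _ x hx; cases hx
  | cons y ys ih =>
    intro b x hx
    simp only [List.foldl_cons]
    rcases List.mem_cons.mp hx with h | h
    · subst h
      exact le_trans (le_max_right _ _) (le_fold_maxS ys _)
    · exact ih _ x h

theorem MaxV_pos (arr : List Int) (hp : ∀ x ∈ arr, Pel x) (hne : arr.map stepA ≠ arr) :
    1 ≤ MaxV arr := by
  have : ¬ ∀ x ∈ arr, stepA x = x := fun h => hne ((map_fix_iff arr).mpr h)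
  push Not at this
  obtain ⟨x, hx, hnf⟩ := this
  have h1 : 1 ≤ stepsV x := by
    rw [stepsV_succ x (ex_fix x (hp x hx)) hnf]; omega
  exact le_trans h1 (mem_le_fold arr 0 x hx)

theorem loopA_eq : ∀ (fuel : Nat) (arr : List Int) (ans : Int), (∀ x ∈ arr, Pel x) →
    MaxV arr < fuel → loopA fuel arr ans = ans + (MaxV arr : Int) := by
  intro fuel
  induction fuel with
  | zero => intro arr ans _ h; exact absurd h (Nat.not_lt_zero _)
  | succ fuel ih =>
    intro arr ans hp hlt
    simp only [loopA, passA]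
    by_cases heq : arr = arr.map stepA
    · rw [if_pos heq]
      have h0 : MaxV arr = 0 := MaxV_zero arr 0 ((map_fix_iff arr).mp heq.symm)
      rw [h0]
      simp
    · rw [if_neg heq]
      have h1 : 1 ≤ MaxV arr := MaxV_pos arr hp (fun h => heq h.symm)
      have hm : MaxV (arr.map stepA) = MaxV arr - 1 := MaxV_map arr hp
      have hp' : ∀ y ∈ arr.map stepA, Pel y := by
        intro y hy
        obtain ⟨x, hx, rfl⟩ := List.mem_map.mp hy
        exact pel_step x (hp x hx)
      rw [ih (arr.map stepA) (ans + 1) hp' (by omega), hm]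
      omega

theorem fuel_big : ∀ (arr : List Int) (m s : Nat), (∀ x ∈ arr, Pel x) → m < s →
    arr.foldl (fun m x => max m (stepsV x)) m < arr.foldl (fun a x => a + x.natAbs + 61) s := by
  intro arr
  induction arr with
  | nil => intro m s _ h; exact h
  | cons x xs ih =>
    intro m s hp hms
    simp only [List.foldl_cons]
    refine ih (max m (stepsV x)) (s + x.natAbs + 61) (fun y hy => hp y (List.mem_cons_of_mem _ hy)) ?_
    have hx : Pel x := hp x (List.mem_cons_self ..)
    have := le_trans (stepsV_le_mu x hx) (mu_le x)
    omega

-- ===== VERDICT (by name: the statement is the Claim_ definition above) =====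
theorem solution_spec : Claim_equal_solution := by
  intro arr _ hpre
  unfold Spec_solution solution
  have hp : ∀ x ∈ arr, Pel x := hpre
  rw [loopA_eq _ arr 0 hp (fuel_big arr 0 1 hp (by omega))]
  have halt : solution_alt arr = (MaxV arr : Int) := by
    unfold solution_alt MaxV
    have h := alt_fold arr 0 hp
    simpa using h
  rw [halt]
  omega
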